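-- pv_equiv track=rewrite | github.com/LukeCPadmore/AoC-2025 | day-9/day-9.py | cell_area
-- ===== SOURCE A (Python) =====
-- def cell_area(outside, x_list, y_list):
--     H = len(y_list) - 1
--     W = len(x_list) - 1
--     A = [[0] * W for _ in range(H)]
--
--     for r in range(H):
--         for c in range(W):
--             # (c, r) are cell coords (x, y)
--             if (c, r) not in outside:
--                 width  = x_list[c+1] - x_list[c]
--                 height = y_list[r+1] - y_list[r]
--                 A[r][c] = width * height
--
--     # build prefix sum
--     PS = [[0] * W for _ in range(H)]
--     for r in range(H):
--         for c in range(W):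
--             PS[r][c] = A[r][c]
--             if r > 0:
--                 PS[r][c] += PS[r-1][c]
--             if c > 0:
--                 PS[r][c] += PS[r][c-1]
--             if r > 0 and c > 0:
--                 PS[r][c] -= PS[r-1][c-1]
--     return PS
-- ===== SOURCE B (Python) =====
-- def cell_area(outside, x_list, y_list):
--     W = len(x_list) - 1
--     H = len(y_list) - 1
--     # pass 1: row-wise left-to-right running sums of the masked cell areas
--     M = []
--     for r in range(H):
--         row = []
--         run = 0
--         for c in range(W):
--             if (c, r) not in outside:
--                 run += (x_list[c+1] - x_list[c]) * (y_list[r+1] - y_list[r])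
--             row.append(run)
--         M.append(row)
--     # pass 2: column-wise top-to-bottom accumulation
--     out = []
--     prev = None
--     for row in M:
--         if prev is not None:
--             row = [a + b for a, b in zip(row, prev)]
--         out.append(row)
--         prev = row
--     return out
-- ===== Notes on version B (the rewrite author's own statement) =====
-- stated objective: alternative
-- what changed: Replaces A's separately built area matrix plus four-term inclusion-exclusion prefix-sum recurrence with two separable 1D sweeps fused with the masking: a left-to-right running sum per row, then a top-to-bottom pointwise accumulation of rows.
import Mathlib
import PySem

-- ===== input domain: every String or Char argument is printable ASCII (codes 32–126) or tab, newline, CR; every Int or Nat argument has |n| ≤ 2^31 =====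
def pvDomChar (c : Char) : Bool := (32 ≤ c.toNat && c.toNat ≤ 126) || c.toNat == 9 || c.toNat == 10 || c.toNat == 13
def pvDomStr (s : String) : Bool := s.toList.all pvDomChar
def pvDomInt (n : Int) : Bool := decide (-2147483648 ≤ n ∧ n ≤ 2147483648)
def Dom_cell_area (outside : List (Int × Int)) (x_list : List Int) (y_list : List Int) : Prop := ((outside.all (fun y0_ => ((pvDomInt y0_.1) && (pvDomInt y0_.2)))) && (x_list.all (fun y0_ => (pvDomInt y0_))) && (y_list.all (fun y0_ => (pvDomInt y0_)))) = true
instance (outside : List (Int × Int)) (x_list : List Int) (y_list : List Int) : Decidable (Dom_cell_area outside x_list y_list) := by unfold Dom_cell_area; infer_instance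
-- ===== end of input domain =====

-- B replaces A's four-term inclusion–exclusion prefix-sum recurrence (over a separately
-- built area matrix) by two separable 1D sweeps fused with the masking: a left-to-right
-- running sum per row, then a top-to-bottom pointwise accumulation of rows (objective:
-- alternative decomposition, same cost).

-- masked cell area, the expression both Pythons compute for cell (c, r)
-- (all indexing here is in range in Python whenever it is executed, so getD is exact)
def pvArea (outside : List (Int × Int)) (x_list : List Int) (y_list : List Int) (r c : Nat) : Int :=
  if ((c : Int), (r : Int)) ∈ outside then 0
  else (x_list.getD (c+1) 0 - x_list.getD c 0) * (y_list.getD (r+1) 0 - y_list.getD r 0)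

-- ===== PORT A =====
def cell_area (outside : List (Int × Int)) (x_list : List Int) (y_list : List Int) : List (List Int) :=
  let H := y_list.length - 1
  let W := x_list.length - 1
  -- first loop pair: the area matrix A (0 where (c,r) ∈ outside)
  let A := (List.range H).map (fun r => (List.range W).map (fun c => pvArea outside x_list y_list r c))
  -- second loop pair: prefix sums via the four-term inclusion–exclusion recurrence,
  -- row by row (ps = completed rows), cell by cell (cur = completed cells of this row)
  (List.range H).foldl (fun ps r =>
      ps ++ [(List.range W).foldl (fun cur c =>
          cur ++ [(A.getD r []).getD c 0
              + (if 0 < r then (ps.getD (r-1) []).getD c 0 else 0)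
              + (if 0 < c then cur.getD (c-1) 0 else 0)
              - (if 0 < r ∧ 0 < c then (ps.getD (r-1) []).getD (c-1) 0 else 0)]) []]) []

-- ===== PORT B =====
def cell_area_alt (outside : List (Int × Int)) (x_list : List Int) (y_list : List Int) : List (List Int) :=
  let W := x_list.length - 1
  let H := y_list.length - 1
  -- pass 1: per-row left-to-right running sums of the masked areas (state = (row, run))
  let M := (List.range H).map (fun r =>
      ((List.range W).foldl (fun (st : List Int × Int) c =>
          (st.1 ++ [st.2 + pvArea outside x_list y_list r c],
           st.2 + pvArea outside x_list y_list r c)) ([], 0)).1)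
  -- pass 2: top-to-bottom pointwise accumulation (state = (out, prev row))
  (M.foldl (fun (st : List (List Int) × Option (List Int)) row =>
      (st.1 ++ [match st.2 with
                | none => row
                | some p => List.zipWith (fun a b => a + b) row p],
       some (match st.2 with
                | none => row
                | some p => List.zipWith (fun a b => a + b) row p))) ([], none)).1

-- ===== PRECONDITION & SPEC =====
def Spec_cell_area (outside : List (Int × Int)) (x_list : List Int) (y_list : List Int) (out : List (List Int)) : Prop := out = cell_area_alt outside x_list y_list
instance (outside : List (Int × Int)) (x_list : List Int) (y_list : List Int) (out : List (List Int)) : Decidable (Spec_cell_area outside x_list y_list out) := by unfold Spec_cell_area; infer_instance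

-- ===== CLAIM (what is proved, stated in full; the proofs are below) =====
def Claim_equal_cell_area : Prop := ∀ (outside : List (Int × Int)) (x_list : List Int) (y_list : List Int), Dom_cell_area outside x_list y_list → Spec_cell_area outside x_list y_list (cell_area outside x_list y_list)

-- ===== LEMMAS AND PROOFS =====

-- the double prefix sum both programs compute
def pvDD (f : Nat → Nat → Int) (r c : Nat) : Int :=
  ∑ i ∈ Finset.range (r+1), ∑ j ∈ Finset.range (c+1), f i j

theorem pv_getD_map_range {α : Type} (g : Nat → α) (d : α) {r H : Nat} (h : r < H) :
    (((List.range H).map g).getD r d) = g r := by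
  simp [List.getD_eq_getElem?_getD, h]

theorem pv_zipWith_map_same {α β : Type} (k : β → β → β) (g h : α → β) (l : List α) :
    List.zipWith k (l.map g) (l.map h) = l.map (fun x => k (g x) (h x)) := by
  induction l with
  | nil => simp
  | cons a t ih => simp [ih]

theorem pv_dd_rec (f : Nat → Nat → Int) (r c : Nat) :
    f r c + (if 0 < r then pvDD f (r-1) c else 0) + (if 0 < c then pvDD f r (c-1) else 0)
      - (if 0 < r ∧ 0 < c then pvDD f (r-1) (c-1) else 0) = pvDD f r c := by
  rcases r with _ | a <;> rcases c with _ | b <;>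
    simp [pvDD, Finset.sum_range_succ, Finset.sum_add_distrib] <;> ring

theorem pv_innerA (f : Nat → Nat → Int) (W H r : Nat) (hr : r < H) (ps : List (List Int))
    (hps : 0 < r → ps.getD (r-1) [] = (List.range W).map (pvDD f (r-1)))
    (n : Nat) (hn : n ≤ W) :
    (List.range n).foldl (fun cur c =>
        cur ++ [(((List.range H).map (fun r => (List.range W).map (f r))).getD r []).getD c 0
            + (if 0 < r then (ps.getD (r-1) []).getD c 0 else 0)
            + (if 0 < c then cur.getD (c-1) 0 else 0)
            - (if 0 < r ∧ 0 < c then (ps.getD (r-1) []).getD (c-1) 0 else 0)]) []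
    = (List.range n).map (pvDD f r) := by
  induction n with
  | zero => simp
  | succ m ih =>
    rw [List.range_succ, List.foldl_append, ih (Nat.le_of_succ_le hn)]
    have hm : m < W := hn
    have h1 : (((List.range H).map (fun r => (List.range W).map (f r))).getD r []).getD m 0
        = f r m := by rw [pv_getD_map_range _ _ hr, pv_getD_map_range _ _ hm]
    simp only [List.foldl_cons, List.foldl_nil, List.map_append, List.map_cons, List.map_nil,
      List.append_cancel_left_eq, List.cons.injEq, and_true]
    rw [h1]
    have h2 : (if 0 < r then (ps.getD (r-1) []).getD m 0 else 0)
        = (if 0 < r then pvDD f (r-1) m else 0) := by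
      split_ifs with h
      · rw [hps h, pv_getD_map_range _ _ hm]
      · rfl
    have h3 : (if 0 < m then ((List.range m).map (pvDD f r)).getD (m-1) 0 else 0)
        = (if 0 < m then pvDD f r (m-1) else 0) := by
      split_ifs with h
      · exact pv_getD_map_range _ _ (Nat.sub_lt h Nat.one_pos)
      · rfl
    have h4 : (if 0 < r ∧ 0 < m then (ps.getD (r-1) []).getD (m-1) 0 else 0)
        = (if 0 < r ∧ 0 < m then pvDD f (r-1) (m-1) else 0) := by
      split_ifs with h
      · rw [hps h.1, pv_getD_map_range _ _ (lt_of_le_of_lt (Nat.sub_le m 1) hm)]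
      · rfl
    rw [h2, h3, h4, pv_dd_rec]

theorem pv_outerA (f : Nat → Nat → Int) (W H : Nat) (n : Nat) (hn : n ≤ H) :
    (List.range n).foldl (fun ps r =>
        ps ++ [(List.range W).foldl (fun cur c =>
            cur ++ [(((List.range H).map (fun r => (List.range W).map (f r))).getD r []).getD c 0
                + (if 0 < r then (ps.getD (r-1) []).getD c 0 else 0)
                + (if 0 < c then cur.getD (c-1) 0 else 0)
                - (if 0 < r ∧ 0 < c then (ps.getD (r-1) []).getD (c-1) 0 else 0)]) []]) []
    = (List.range n).map (fun r => (List.range W).map (pvDD f r)) := by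
  induction n with
  | zero => simp
  | succ m ih =>
    rw [List.range_succ, List.foldl_append, ih (Nat.le_of_succ_le hn)]
    simp only [List.foldl_cons, List.foldl_nil, List.map_append, List.map_cons, List.map_nil,
      List.append_cancel_left_eq, List.cons.injEq, and_true]
    exact pv_innerA f W H m hn _
      (fun h => pv_getD_map_range _ _ (Nat.sub_lt h Nat.one_pos)) W le_rfl

theorem pv_scanB (f : Nat → Int) (W : Nat) :
    (List.range W).foldl (fun (st : List Int × Int) c =>
        (st.1 ++ [st.2 + f c], st.2 + f c)) ([], 0)
    = ((List.range W).map (fun c => ∑ j ∈ Finset.range (c+1), f j),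
       ∑ j ∈ Finset.range W, f j) := by
  induction W with
  | zero => simp
  | succ n ih =>
    rw [List.range_succ, List.foldl_append, ih]
    simp [Finset.sum_range_succ]

theorem pv_colB (S : Nat → Nat → Int) (W H : Nat) :
    ((List.range H).map (fun r => (List.range W).map (S r))).foldl
      (fun (st : List (List Int) × Option (List Int)) row =>
        (st.1 ++ [match st.2 with
                  | none => row
                  | some p => List.zipWith (fun a b => a + b) row p],
         some (match st.2 with
                  | none => row
                  | some p => List.zipWith (fun a b => a + b) row p))) ([], none)
    = ((List.range H).map (fun r => (List.range W).map (fun c => ∑ i ∈ Finset.range (r+1), S i c)),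
       if H = 0 then none
       else some ((List.range W).map (fun c => ∑ i ∈ Finset.range ((H-1)+1), S i c))) := by
  induction H with
  | zero => simp
  | succ n ih =>
    rw [List.range_succ, List.map_append, List.foldl_append, ih]
    cases n with
    | zero => simp
    | succ m =>
      simp only [List.map_cons, List.map_nil, List.foldl_cons, List.foldl_nil,
        Nat.succ_ne_zero, if_false, Nat.add_sub_cancel, List.range_succ,
        List.map_append, Prod.mk.injEq, List.append_cancel_left_eq]
      rw [pv_zipWith_map_same]
      constructor
      · simp only [List.cons.injEq, and_true]
        refine List.map_congr_left (fun c _ => ?_)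
        rw [Finset.sum_range_succ (fun i => S i c) (m+1)]
        ring
      · refine congrArg some (List.map_congr_left (fun c _ => ?_))
        rw [Finset.sum_range_succ (fun i => S i c) (m+1)]
        ring

-- ===== VERDICT (by name: the statement is the Claim_ definition above) =====
theorem cell_area_spec : Claim_equal_cell_area := by
  intro outside x_list y_list _
  unfold Spec_cell_area
  simp only [cell_area, cell_area_alt]
  rw [pv_outerA (pvArea outside x_list y_list) (x_list.length - 1) (y_list.length - 1)
      (y_list.length - 1) le_rfl]
  simp only [pv_scanB, pv_colB]
  rfl
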